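-- pv_equiv track=rewrite | github.com/JoseVColino/Competitive_Programming_Solutions_Code_bank | python_competitive/muralhas_reforcadas.py | max_min_height
-- ===== SOURCE A (Python) =====
-- from collections import deque
--
-- def max_min_height(a, K):
--     """
--     a: list (0-indexed) com as alturas x1..xN
--     K: inteiro
--     Retorna inteiro: maior altura mínima possível após um único reforço.
--     """
--     N = len(a)
--     # Converter para 1-based para fórmulas diretas
--     a = [0] + a
--     INF = 10**30
--
--     # prefix_min[i] = min a[1..i]
--     prefix_min = [INF] * (N + 1)
--     for i in range(1, N+1):
--         prefix_min[i] = min(prefix_min[i-1], a[i])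
--
--     # suffix_min[i] = min a[i..N]
--     suffix_min = [INF] * (N + 2)
--     for i in range(N, 0, -1):
--         suffix_min[i] = min(suffix_min[i+1], a[i])
--
--     # b[j] = a[j] + j
--     b = [0] * (N + 1)
--     for j in range(1, N + 1):
--         b[j] = a[j] + j
--
--     dq = deque()  # manterá índices j com b[j] em ordem crescente
--     ans = -INF
--
--     for i in range(1, N + 1):
--         L = max(1, i - K + 1)  # janela [L..i] coberta pela escada
--
--         # remover índices fora da janela (à esquerda)
--         while dq and dq[0] < L:
--             dq.popleft()
--
--         # inserir i mantendo monotonicidade por b[]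
--         while dq and b[dq[-1]] >= b[i]:
--             dq.pop()
--         dq.append(i)
--
--         # mínimo de b na janela é b[dq[0]]
--         min_b = b[dq[0]]
--
--         # mínimo fora da janela (posições que não recebem blocos)
--         min_outside = INF
--         if L - 1 >= 1:
--             min_outside = min(min_outside, prefix_min[L - 1])
--         if i + 1 <= N:
--             min_outside = min(min_outside, suffix_min[i + 1])
--
--         # mínimo dentro da janela após o reforço: min_b + K - i
--         min_inside_after = min_b + K - i
--
--         # o mínimo total após operação terminando em i
--         curr_min = min(min_outside, min_inside_after)
--
--         # queremos o maior possível entre todas as escolhas de i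
--         ans = max(ans, curr_min)
--
--     return int(ans)
-- ===== SOURCE B (Python) =====
-- from itertools import accumulate
--
-- def max_min_height(a, K):
--     """
--     a: list (0-indexed) com as alturas x1..xN
--     K: inteiro
--     Retorna inteiro: maior altura minima possivel apos um unico reforco.
--     """
--     N = len(a)
--     INF = 10**30
--     if N == 0:
--         return -INF
--
--     # running minima of a (0-based): pref[i] = min(a[0..i]), suf[i] = min(a[i..N-1])
--     pref = list(accumulate(a, min))
--     suf = list(accumulate(reversed(a), min))[::-1]
--
--     # b values, 1-based formula b[j] = a[j] + j stored 0-based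
--     b = [x + j for j, x in enumerate(a, start=1)]
--
--     # block decomposition for sliding-window minima of b: blocks of size blk
--     blk = K if K >= 1 else 1
--     bpre = []           # min of b from its block start through idx
--     for idx, v in enumerate(b):
--         bpre.append(v if idx % blk == 0 else min(bpre[-1], v))
--     bsuf = [0] * N      # min of b from idx through its block end (clipped at N-1)
--     run = INF
--     for idx in range(N - 1, -1, -1):
--         run = b[idx] if (idx % blk == blk - 1 or idx == N - 1) else min(run, b[idx])
--         bsuf[idx] = run
--
--     ans = -INF
--     for i in range(1, N + 1):
--         L = max(1, i - K + 1)
--         j0 = min(L, i)          # the window always includes position i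
--         if (j0 - 1) // blk == (i - 1) // blk:
--             min_b = bpre[i - 1]
--         else:
--             min_b = min(bsuf[j0 - 1], bpre[i - 1])
--         min_outside = INF
--         if L >= 2:
--             min_outside = pref[L - 2]
--         if i < N:
--             min_outside = min(min_outside, suf[i])
--         ans = max(ans, min(min_outside, min_b + K - i))
--     return ans
-- ===== Notes on version B (the rewrite author's own statement) =====
-- stated objective: alternative
-- what changed: The monotonic-deque sliding-window minimum over b[j]=a[j]+j is replaced by a block decomposition (within-block prefix minima bpre and suffix minima bsuf combined per window), and the handwritten prefix/suffix minimum arrays by itertools.accumulate scans.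
import Mathlib
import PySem

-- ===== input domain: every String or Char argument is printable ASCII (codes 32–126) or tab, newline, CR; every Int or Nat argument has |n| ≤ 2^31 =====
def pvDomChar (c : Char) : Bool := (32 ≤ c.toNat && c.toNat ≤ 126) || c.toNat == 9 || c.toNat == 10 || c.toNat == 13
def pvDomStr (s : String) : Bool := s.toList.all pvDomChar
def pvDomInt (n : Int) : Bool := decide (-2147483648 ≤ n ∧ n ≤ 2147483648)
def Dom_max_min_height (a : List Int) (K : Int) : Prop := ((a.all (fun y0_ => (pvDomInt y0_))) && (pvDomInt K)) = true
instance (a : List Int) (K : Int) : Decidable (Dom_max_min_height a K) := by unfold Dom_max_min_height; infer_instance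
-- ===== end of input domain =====

-- B replaces A's monotonic-deque sliding-window minimum by a block-decomposition
-- (within-block prefix/suffix minima) and the handwritten prefix/suffix scans by
-- accumulate-style scans: an alternative algorithm of the same O(N) cost.

-- ===== PORT A =====
-- Arrays that Python fills index by index in loop order are built by append /
-- prepend folds holding the same values; the deque is a list (front = head).
def max_min_height (a : List Int) (K : Int) : Int :=
  let N : Int := a.length
  let a1 : List Int := 0 :: a
  let INF : Int := 10 ^ 30
  let prefix_min : List Int :=
    (PySem.List.pyRange 1 (N + 1) 1).foldl
      (fun pm i => pm ++ [min (pm.getLastD INF) (PySem.List.pyGetD a1 i 0)]) [INF]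
  let suffix_min : List Int :=
    INF ::
      (PySem.List.pyRange N 0 (-1)).foldl
        (fun sm i => min (sm.headD INF) (PySem.List.pyGetD a1 i 0) :: sm) [INF]
  let b : List Int :=
    (PySem.List.pyRange 1 (N + 1) 1).foldl
      (fun bl j => bl ++ [PySem.List.pyGetD a1 j 0 + j]) [0]
  (((PySem.List.pyRange 1 (N + 1) 1).foldl
    (fun (st : List Int × Int) i =>
      let L := max 1 (i - K + 1)
      let dq1 := st.1.dropWhile (fun j => decide (j < L))
      let dq2 := (dq1.reverse.dropWhile
        (fun j => decide (PySem.List.pyGetD b i 0 ≤ PySem.List.pyGetD b j 0))).reverse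
      let dq3 := dq2 ++ [i]
      let min_b := PySem.List.pyGetD b (dq3.headD 0) 0
      let mo1 := if 1 ≤ L - 1 then min INF (PySem.List.pyGetD prefix_min (L - 1) 0) else INF
      let mo2 := if i + 1 ≤ N then min mo1 (PySem.List.pyGetD suffix_min (i + 1) 0) else mo1
      (dq3, max st.2 (min mo2 (min_b + K - i))))
    ([], -INF)).2)

-- ===== PORT B =====
def max_min_height_alt (a : List Int) (K : Int) : Int :=
  let N : Int := a.length
  let INF : Int := 10 ^ 30
  if a.isEmpty then -INF else
  let pref : List Int := List.scanl min (a.headD 0) a.tail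
  let suf : List Int := (List.scanl min (a.reverse.headD 0) a.reverse.tail).reverse
  let b : List Int := (PySem.List.enumerate a 1).map (fun p => p.2 + p.1)
  let blk : Int := if 1 ≤ K then K else 1
  let bpre : List Int :=
    (PySem.List.enumerate b 0).foldl
      (fun acc p =>
        acc ++ [if PySem.Int.mod p.1 blk == 0 then p.2 else min (acc.getLastD 0) p.2]) []
  let bsuf : List Int :=
    ((PySem.List.pyRange (N - 1) (-1) (-1)).foldl
      (fun (st : List Int × Int) idx =>
        let run := if PySem.Int.mod idx blk == blk - 1 || idx == N - 1
          then PySem.List.pyGetD b idx 0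
          else min st.2 (PySem.List.pyGetD b idx 0)
        (run :: st.1, run))
      ([], INF)).1
  (PySem.List.pyRange 1 (N + 1) 1).foldl
    (fun ans i =>
      let L := max 1 (i - K + 1)
      let j0 := min L i
      let min_b :=
        if PySem.Int.floordiv (j0 - 1) blk == PySem.Int.floordiv (i - 1) blk
        then PySem.List.pyGetD bpre (i - 1) 0
        else min (PySem.List.pyGetD bsuf (j0 - 1) 0) (PySem.List.pyGetD bpre (i - 1) 0)
      let mo1 := if 2 ≤ L then PySem.List.pyGetD pref (L - 2) 0 else INF
      let mo2 := if i < N then min mo1 (PySem.List.pyGetD suf i 0) else mo1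
      max ans (min mo2 (min_b + K - i)))
    (-INF)

-- ===== PRECONDITION & SPEC =====
-- Pre_ excludes only inputs on which A raises: for a nonempty list and K < 0 the
-- window start L = max(1, i-K+1) makes L-1 exceed N, so prefix_min[L-1] raises IndexError.
def Pre_max_min_height (a : List Int) (K : Int) : Prop := a = [] ∨ 0 ≤ K
instance (a : List Int) (K : Int) : Decidable (Pre_max_min_height a K) := by
  unfold Pre_max_min_height; infer_instance
def pvWitness_max_min_height : List Int × Int := ([3, 1, 4, 1, 5], 2)
def Spec_max_min_height (a : List Int) (K : Int) (out : Int) : Prop := out = max_min_height_alt a K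
instance (a : List Int) (K : Int) (out : Int) : Decidable (Spec_max_min_height a K out) := by
  unfold Spec_max_min_height; infer_instance

-- ===== CLAIM (what is proved, stated in full; the proofs are below) =====
def Claim_equal_max_min_height : Prop := ∀ (a : List Int) (K : Int), Dom_max_min_height a K → Pre_max_min_height a K → Spec_max_min_height a K (max_min_height a K)

-- ===== LEMMAS AND PROOFS =====

-- spec-side values: a[j] (1-based), b[j] = a[j] + j, and interval minima
def pvAv (a : List Int) (j : Int) : Int := PySem.List.pyGetD (0 :: a) j 0
def pvBv (a : List Int) (j : Int) : Int := pvAv a j + j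

def pvMinN (f : Int → Int) (lo : Int) : Nat → Int
  | 0 => f lo
  | n+1 => min (pvMinN f lo n) (f (lo + (n : Int) + 1))

def pvMin (f : Int → Int) (lo hi : Int) : Int := pvMinN f lo (hi - lo).toNat

theorem pvMin_same (f : Int → Int) (lo : Int) : pvMin f lo lo = f lo := by
  simp [pvMin, pvMinN]

theorem pvMin_concat (f : Int → Int) (lo hi : Int) (h : lo ≤ hi) :
    pvMin f lo (hi + 1) = min (pvMin f lo hi) (f (hi + 1)) := by
  unfold pvMin
  have h1 : (hi + 1 - lo).toNat = (hi - lo).toNat + 1 := by omega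
  rw [h1]
  show min (pvMinN f lo (hi - lo).toNat) (f (lo + ((hi - lo).toNat : Int) + 1)) = _
  have e : lo + ((hi - lo).toNat : Int) + 1 = hi + 1 := by omega
  rw [e]

theorem pvMin_peel (f : Int → Int) (lo hi : Int) (h : lo < hi) :
    pvMin f lo hi = min (f lo) (pvMin f (lo + 1) hi) := by
  have hn : ∃ n : Nat, hi = lo + 1 + n := ⟨(hi - lo - 1).toNat, by omega⟩
  obtain ⟨n, rfl⟩ := hn
  clear h
  induction n with
  | zero => simp [pvMin_same, pvMin_concat f lo lo le_rfl]
  | succ n ih =>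
      have e : lo + 1 + (n + 1 : Nat) = (lo + 1 + n) + 1 := by push_cast; ring
      rw [e, pvMin_concat f lo _ (by omega),
        pvMin_concat f (lo + 1) _ (by omega), ih, min_assoc]

theorem pvMinN_le (f : Int → Int) (lo : Int) (n k : Nat) (h : k ≤ n) :
    pvMinN f lo n ≤ f (lo + (k : Int)) := by
  induction n with
  | zero =>
      interval_cases k
      simp [pvMinN]
  | succ n ih =>
      by_cases hk : k ≤ n
      · exact le_trans (min_le_left _ _) (ih hk)
      · have hk1 : k = n + 1 := by omega
        refine le_trans (min_le_right _ _) (le_of_eq ?_)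
        congr 1
        omega
      
theorem pvMinN_attain (f : Int → Int) (lo : Int) (n : Nat) :
    ∃ k : Nat, k ≤ n ∧ pvMinN f lo n = f (lo + (k : Int)) := by
  induction n with
  | zero => exact ⟨0, le_rfl, by simp [pvMinN]⟩
  | succ n ih =>
      obtain ⟨k, hk, he⟩ := ih
      rcases le_total (pvMinN f lo n) (f (lo + (n : Int) + 1)) with h | h
      · exact ⟨k, by omega, by
          rw [show pvMinN f lo (n+1) = min (pvMinN f lo n) (f (lo + (n : Int) + 1)) from rfl,
            min_eq_left h, he]⟩
      · refine ⟨n + 1, le_rfl, ?_⟩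
        rw [show pvMinN f lo (n+1) = min (pvMinN f lo n) (f (lo + (n : Int) + 1)) from rfl,
          min_eq_right h]
        congr 1
        omega

theorem pvMin_le (f : Int → Int) (lo hi j : Int) (h1 : lo ≤ j) (h2 : j ≤ hi) :
    pvMin f lo hi ≤ f j := by
  have := pvMinN_le f lo (hi - lo).toNat (j - lo).toNat (by omega)
  have e : lo + ((j - lo).toNat : Int) = j := by omega
  rw [e] at this
  exact this

theorem pvMin_attain (f : Int → Int) (lo hi : Int) (h : lo ≤ hi) :
    ∃ j : Int, lo ≤ j ∧ j ≤ hi ∧ pvMin f lo hi = f j := by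
  obtain ⟨k, hk, he⟩ := pvMinN_attain f lo (hi - lo).toNat
  exact ⟨lo + k, by omega, by omega, he⟩

theorem pvMin_split (f : Int → Int) (lo m hi : Int) (h1 : lo ≤ m) (h2 : m < hi) :
    pvMin f lo hi = min (pvMin f lo m) (pvMin f (m + 1) hi) := by
  have hn : ∃ n : Nat, hi = m + 1 + n := ⟨(hi - m - 1).toNat, by omega⟩
  obtain ⟨n, rfl⟩ := hn
  clear h2
  induction n with
  | zero => simp [pvMin_same, pvMin_concat f lo m h1]
  | succ n ih =>
      have e : m + 1 + (n + 1 : Nat) = (m + 1 + n) + 1 := by push_cast; ring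
      rw [e, pvMin_concat f lo _ (by omega),
        pvMin_concat f (m + 1) _ (by omega), ih, min_assoc]


-- indexing helpers for the concrete list shapes the ports read from
theorem pvGetD_cons_pos (x : Int) (l : List Int) (k d : Int) (h : 1 ≤ k) :
    PySem.List.pyGetD (x :: l) k d = PySem.List.pyGetD l (k - 1) d := by
  obtain ⟨n, rfl⟩ : ∃ n : Nat, k = (n : Int) + 1 := ⟨(k - 1).toNat, by omega⟩
  have e1 : (n : Int) + 1 - 1 = (n : Int) := by ring
  have e2 : (n : Int) + 1 = ((n + 1 : Nat) : Int) := by push_cast; ring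
  rw [e1, PySem.List.pyGetD_natCast l n, e2, PySem.List.pyGetD_natCast (x :: l) (n + 1),
    List.getD_cons_succ]

theorem pvRead_cons_map (g : Int → Int) (x d N k : Int) (h1 : 1 ≤ k) (h2 : k ≤ N) :
    PySem.List.pyGetD (x :: (PySem.List.pyRange 1 (N + 1) 1).map g) k d = g k := by
  rw [pvGetD_cons_pos _ _ _ _ h1]
  have e : k - 1 = (((k - 1).toNat : Int)) := by omega
  rw [e, PySem.List.pyGetD_map_pyRange_one g 1 (N + 1) (k - 1).toNat d (by omega)]
  congr 1
  omega

theorem pvRead_cons_map_append (g : Int → Int) (x y d N k : Int) (h1 : 1 ≤ k) (h2 : k ≤ N) :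
    PySem.List.pyGetD (x :: ((PySem.List.pyRange 1 (N + 1) 1).map g ++ [y])) k d = g k := by
  rw [pvGetD_cons_pos _ _ _ _ h1]
  have hlen : ((PySem.List.pyRange 1 (N + 1) 1).map g).length = N.toNat := by
    rw [List.length_map, PySem.List.length_pyRange_one]
    omega
  have hklt : (k - 1).toNat < ((PySem.List.pyRange 1 (N + 1) 1).map g).length := by omega
  rw [PySem.List.pyGetD_eq_getElem _ d (by omega)
    (by rw [List.length_append, hlen]; simp; omega)]
  rw [List.getElem_append_left hklt]
  rw [List.getElem_map, PySem.List.getElem_pyRange_one]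
  congr 1
  omega

-- scanl over min, read pointwise
theorem pvScanl_getD_zero (x : Int) (xs : List Int) (d : Int) :
    (List.scanl min x xs).getD 0 d = x := by
  cases xs with
  | nil => rw [List.scanl_nil]; rfl
  | cons y t => rw [List.scanl_cons]; rfl

theorem pvScanl_getD_succ (xs : List Int) (x : Int) (n : Nat) (h : n < xs.length) :
    (List.scanl min x xs).getD (n + 1) 0 =
      min ((List.scanl min x xs).getD n 0) (xs.getD n 0) := by
  induction xs generalizing x n with
  | nil => simp at h
  | cons y t ih =>
      rw [List.scanl_cons]
      cases n with
      | zero =>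
          simp [List.getD_cons_succ, List.getD_cons_zero, pvScanl_getD_zero]
      | succ n =>
          rw [List.getD_cons_succ, List.getD_cons_succ, List.getD_cons_succ,
            ih (min x y) n (by simpa using h)]


theorem pvAv_eq (a : List Int) (j : Int) : PySem.List.pyGetD (0 :: a) j 0 = pvAv a j := rfl

-- A's prefix_min loop: the written array holds running minima seeded with INF
theorem pvLA1 (a : List Int) (m : Int) (hm : 0 ≤ m) :
    (PySem.List.pyRange 1 (m + 1) 1).foldl
      (fun pm i => pm ++ [min (pm.getLastD (10 ^ 30)) (PySem.List.pyGetD (0 :: a) i 0)])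
      [10 ^ 30]
    = (10 ^ 30 : Int) ::
        (PySem.List.pyRange 1 (m + 1) 1).map (fun k => min (10 ^ 30) (pvMin (pvAv a) 1 k)) := by
  induction m, hm using Int.le_induction with
  | base => rw [show (0:Int) + 1 = 1 by ring, PySem.List.pyRange_one_eq_nil le_rfl]; rfl
  | succ n hn ih =>
      rw [PySem.List.pyRange_one_succ_right (by omega : (1:Int) ≤ n + 1),
        List.foldl_append, ih, List.map_append]
      simp only [List.foldl_cons, List.foldl_nil, List.map_cons, List.map_nil]
      rw [List.cons_append]
      congr 3
      rcases eq_or_lt_of_le hn with h0 | h0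
      · have h0' : n = 0 := h0.symm
        subst h0'
        rw [show (0:Int) + 1 = 1 by ring, PySem.List.pyRange_one_eq_nil le_rfl,
          List.map_nil, pvAv_eq, pvMin_same]
        rfl
      · rw [PySem.List.pyRange_one_succ_right (by omega : (1:Int) ≤ n), List.map_append]
        simp only [List.map_cons, List.map_nil]
        rw [← List.cons_append, List.getLastD_concat, pvAv_eq,
          pvMin_concat (pvAv a) 1 n (by omega), ← min_assoc]

-- A's b loop: b = [0] followed by the values b[j] = a[j] + j
theorem pvLA3 (a : List Int) (m : Int) :
    (PySem.List.pyRange 1 (m + 1) 1).foldl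
      (fun bl j => bl ++ [PySem.List.pyGetD (0 :: a) j 0 + j]) [0]
    = (0 : Int) :: (PySem.List.pyRange 1 (m + 1) 1).map (pvBv a) := by
  rw [PySem.List.foldl_append_singleton_eq_map]
  rfl


-- A's suffix_min loop (downward): invariant over the remaining countdown range
theorem pvLA2aux (a : List Int) (m : Int) (h1 : 1 ≤ m) (hm : m ≤ (a.length : Int) + 1) :
    (PySem.List.pyRange (m - 1) 0 (-1)).foldl
      (fun sm i => min (sm.headD (10 ^ 30)) (PySem.List.pyGetD (0 :: a) i 0) :: sm)
      ((PySem.List.pyRange m ((a.length : Int) + 1) 1).map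
        (fun k => min (10 ^ 30) (pvMin (pvAv a) k (a.length : Int))) ++ [10 ^ 30])
    = (PySem.List.pyRange 1 ((a.length : Int) + 1) 1).map
        (fun k => min (10 ^ 30) (pvMin (pvAv a) k (a.length : Int))) ++ [10 ^ 30] := by
  induction m, h1 using Int.le_induction with
  | base => rw [show (1:Int) - 1 = 0 by ring, PySem.List.pyRange_neg_one_eq_nil le_rfl]; rfl
  | succ n hn ih =>
      rw [show (n + 1 : Int) - 1 = n by ring,
        PySem.List.pyRange_neg_one_cons (by omega : (0:Int) < n), List.foldl_cons]
      have hstep :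
          (min (((PySem.List.pyRange (n + 1) ((a.length : Int) + 1) 1).map
              (fun k => min (10 ^ 30) (pvMin (pvAv a) k (a.length : Int))) ++
              [(10 : Int) ^ 30]).headD (10 ^ 30)) (PySem.List.pyGetD (0 :: a) n 0) ::
            ((PySem.List.pyRange (n + 1) ((a.length : Int) + 1) 1).map
              (fun k => min (10 ^ 30) (pvMin (pvAv a) k (a.length : Int))) ++ [(10 : Int) ^ 30]))
          = (PySem.List.pyRange n ((a.length : Int) + 1) 1).map
              (fun k => min (10 ^ 30) (pvMin (pvAv a) k (a.length : Int))) ++ [(10 : Int) ^ 30] := by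
        rw [PySem.List.pyRange_one_cons (by omega : n < (a.length : Int) + 1), List.map_cons,
          List.cons_append]
        congr 1
        rcases eq_or_lt_of_le hm with hN | hN
        · -- n + 1 = N + 1 : the tail range is empty, head default INF
          have : PySem.List.pyRange (n + 1) ((a.length : Int) + 1) 1 = [] :=
            PySem.List.pyRange_one_eq_nil (by omega)
          rw [this, List.map_nil, List.nil_append]
          have hnN : n = (a.length : Int) := by omega
          rw [pvAv_eq, hnN, pvMin_same]
          rfl
        · -- n < N : head is the suffix minimum from n + 1
          rw [PySem.List.pyRange_one_cons (by omega : n + 1 < (a.length : Int) + 1), List.map_cons,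
            List.cons_append]
          show min (min (10 ^ 30) (pvMin (pvAv a) (n + 1) (a.length : Int)))
              (PySem.List.pyGetD (0 :: a) n 0) = _
          rw [pvAv_eq, pvMin_peel (pvAv a) n (a.length : Int) (by omega),
            min_comm _ (pvAv a n), min_left_comm]
      rw [hstep, ih (by omega)]

-- the exact shape A's suffix_min has after zeta reduction
theorem pvLA2 (a : List Int) :
    (PySem.List.pyRange (a.length : Int) 0 (-1)).foldl
      (fun sm i => min (sm.headD (10 ^ 30)) (PySem.List.pyGetD (0 :: a) i 0) :: sm)
      [10 ^ 30]
    = (PySem.List.pyRange 1 ((a.length : Int) + 1) 1).map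
        (fun k => min (10 ^ 30) (pvMin (pvAv a) k (a.length : Int))) ++ [10 ^ 30] := by
  have := pvLA2aux a ((a.length : Int) + 1) (by omega) le_rfl
  rw [show ((a.length : Int) + 1) - 1 = (a.length : Int) by ring] at this
  rw [← this]
  congr 1
  rw [PySem.List.pyRange_one_eq_nil le_rfl]
  rfl


theorem pvHeadD_getD (l : List Int) (d : Int) : l.headD d = l.getD 0 d := by cases l <;> rfl

theorem pvTail_getD (a : List Int) (p : Nat) : a.tail.getD p 0 = a.getD (p + 1) 0 := by
  cases a <;> rfl

theorem pvAv_getD (a : List Int) (j : Int) (h : 1 ≤ j) : pvAv a j = a.getD (j - 1).toNat 0 := by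
  unfold pvAv
  obtain ⟨n, rfl⟩ : ∃ n : Nat, j = (n : Int) + 1 := ⟨(j - 1).toNat, by omega⟩
  have e2 : (n : Int) + 1 = ((n + 1 : Nat) : Int) := by push_cast; ring
  rw [e2, PySem.List.pyGetD_natCast, List.getD_cons_succ]
  congr 1
  omega

theorem pvRev_getD (l : List Int) (p : Nat) (h : p < l.length) :
    l.reverse.getD p 0 = l.getD (l.length - 1 - p) 0 := by
  rw [List.getD_eq_getElem?_getD, List.getD_eq_getElem?_getD, List.getElem?_reverse h]

-- B's pref: scanl of running minima, read pointwise
theorem pvLB1 (a : List Int) (k : Int) (h1 : 1 ≤ k) (h2 : k ≤ (a.length : Int)) :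
    PySem.List.pyGetD (List.scanl min (a.headD 0) a.tail) (k - 1) 0 = pvMin (pvAv a) 1 k := by
  induction k, h1 using Int.le_induction with
  | base =>
      rw [show (1:Int) - 1 = ((0 : Nat) : Int) by ring, PySem.List.pyGetD_natCast,
        pvScanl_getD_zero, pvMin_same, pvAv_getD a 1 le_rfl, pvHeadD_getD]
      rfl
  | succ n hn ih =>
      have hlen : a.tail.length = a.length - 1 := List.length_tail
      have e : (n : Int) + 1 - 1 = (((n.toNat - 1) + 1 : Nat) : Int) := by omega
      rw [e, PySem.List.pyGetD_natCast,
        pvScanl_getD_succ a.tail (a.headD 0) (n.toNat - 1) (by omega),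
        pvTail_getD, pvMin_concat (pvAv a) 1 n hn]
      congr 1
      · have e2 : n - 1 = (((n.toNat - 1) : Nat) : Int) := by omega
        rw [← ih (by omega), e2, PySem.List.pyGetD_natCast]
      · rw [pvAv_getD a (n + 1) (by omega)]
        congr 1
        omega

-- B's suf: reversed scanl over the reversed list, read pointwise
theorem pvLB2aux (a : List Int) (ha : a ≠ []) (p : Nat) (hp : p ≤ a.length - 1) :
    (List.scanl min (a.reverse.headD 0) a.reverse.tail).getD p 0 =
      pvMin (pvAv a) ((a.length : Int) - p) (a.length : Int) := by
  have hlen0 : 0 < a.length := List.length_pos_of_ne_nil ha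
  induction p with
  | zero =>
      rw [pvScanl_getD_zero, pvHeadD_getD, pvRev_getD a 0 hlen0]
      simp only [Nat.cast_zero, sub_zero, Nat.sub_zero]
      rw [pvMin_same, pvAv_getD a (a.length : Int) (by omega)]
      congr 1
      omega
  | succ p ih =>
      have hrl : a.reverse.tail.length = a.length - 1 := by
        rw [List.length_tail, List.length_reverse]
      rw [pvScanl_getD_succ a.reverse.tail (a.reverse.headD 0) p (by omega),
        pvTail_getD, pvRev_getD a (p + 1) (by omega), ih (by omega)]
      have hlt : (a.length : Int) - ((p + 1 : Nat) : Int) < (a.length : Int) := by push_cast; omega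
      rw [pvMin_peel (pvAv a) _ _ hlt]
      have e1 : (a.length : Int) - ((p + 1 : Nat) : Int) + 1 = (a.length : Int) - (p : Nat) := by
        push_cast; ring
      rw [e1, min_comm ((pvAv a) ((a.length : Int) - ((p + 1 : Nat) : Int))) _]
      congr 1
      rw [pvAv_getD a ((a.length : Int) - ((p + 1 : Nat) : Int)) (by push_cast; omega)]
      congr 1
      push_cast
      omega

theorem pvLB2 (a : List Int) (i : Int) (ha : a ≠ []) (h1 : 1 ≤ i) (h2 : i ≤ (a.length : Int) - 1) :
    PySem.List.pyGetD ((List.scanl min (a.reverse.headD 0) a.reverse.tail).reverse) i 0 =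
      pvMin (pvAv a) (i + 1) (a.length : Int) := by
  have hslen : (List.scanl min (a.reverse.headD 0) a.reverse.tail).length = a.length := by
    rw [List.length_scanl, List.length_tail, List.length_reverse]
    omega
  have e : i = ((i.toNat : Nat) : Int) := by omega
  rw [e, PySem.List.pyGetD_natCast, pvRev_getD _ i.toNat (by omega),
    hslen, pvLB2aux a ha (a.length - 1 - i.toNat) (by omega)]
  congr 1
  omega

-- B's b: enumerate-map, read pointwise
theorem pvLBb (a : List Int) (k : Int) (h0 : 0 ≤ k) (h2 : k < (a.length : Int)) :
    PySem.List.pyGetD ((PySem.List.enumerate a 1).map (fun p => p.2 + p.1)) k 0 = pvBv a (k + 1) := by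
  have hlen : ((PySem.List.enumerate a 1).map (fun p => p.2 + p.1)).length = a.length := by
    rw [List.length_map, PySem.List.length_enumerate]
  rw [PySem.List.pyGetD_eq_getElem _ 0 h0 (by omega)]
  simp only [List.getElem_map, PySem.List.getElem_enumerate]
  rw [pvBv, pvAv_getD a (k + 1) (by omega)]
  have e : (k + 1 - 1).toNat = k.toNat := by omega
  rw [e, List.getD_eq_getElem a _ (by omega)]
  omega


-- block-start of the 1-based position i for block size blk
def pvBs (blk i : Int) : Int := i - PySem.Int.mod (i - 1) blk

theorem pvEmod_succ (x blk : Int) (hblk : 0 < blk) (h : x % blk ≠ 0) :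
    x % blk = (x - 1) % blk + 1 := by
  have hid : blk * ((x - 1) / blk) + (x - 1) % blk = x - 1 := Int.ediv_add_emod _ _
  have hlt : (x - 1) % blk < blk := Int.emod_lt_of_pos _ hblk
  have hge : 0 ≤ (x - 1) % blk := Int.emod_nonneg _ (ne_of_gt hblk)
  set r := (x - 1) % blk with hr
  set q := (x - 1) / blk with hq
  have hx : x = r + 1 + blk * q := by omega
  have hm : x % blk = (r + 1) % blk := by
    rw [hx, Int.add_mul_emod_self_left]
  rcases eq_or_lt_of_le (by omega : r + 1 ≤ blk) with he | hlt2
  · exfalso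
    apply h
    rw [hm, he, Int.emod_self]
  · rw [hm, Int.emod_eq_of_lt (by omega) hlt2]

theorem pvEmod_succ' (x blk : Int) (hblk : 0 < blk) (h : x % blk ≠ blk - 1) :
    (x + 1) % blk = x % blk + 1 := by
  have h0 : (x + 1) % blk ≠ 0 := by
    intro h0
    apply h
    have hid : blk * (x / blk) + x % blk = x := Int.ediv_add_emod _ _
    have hlt : x % blk < blk := Int.emod_lt_of_pos _ hblk
    have hge : 0 ≤ x % blk := Int.emod_nonneg _ (ne_of_gt hblk)
    have hid2 : blk * ((x + 1) / blk) + (x + 1) % blk = x + 1 := Int.ediv_add_emod _ _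
    -- x + 1 ≡ 0, so x ≡ blk - 1
    have := pvEmod_succ (x + 1) blk hblk
    by_cases hz : x % blk = blk - 1
    · exact hz
    · exfalso
      have hs : (x + 1) % blk = x % blk + 1 := by
        have hm : (x + 1) % blk = (x % blk + 1) % blk := by
          conv_lhs => rw [show x + 1 = x % blk + 1 + blk * (x / blk) by omega]
          rw [Int.add_mul_emod_self_left]
        rw [hm, Int.emod_eq_of_lt (by omega) (by omega)]
      omega
  have := pvEmod_succ (x + 1) blk hblk h0
  simpa using this

theorem pvLBpre (a b' : List Int) (blk : Int) (hblk : 0 < blk)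
    (hlen : b'.length = a.length)
    (hb : ∀ k : Int, 0 ≤ k → k < (a.length : Int) → PySem.List.pyGetD b' k 0 = pvBv a (k + 1)) :
    (PySem.List.enumerate b' 0).foldl
      (fun acc p => acc ++ [if PySem.Int.mod p.1 blk == 0 then p.2 else min (acc.getLastD 0) p.2])
      []
    = (PySem.List.pyRange 0 (a.length : Int) 1).map
        (fun idx => pvMin (pvBv a) (pvBs blk (idx + 1)) (idx + 1)) := by
  rw [PySem.List.enumerate_eq_map_pyRange b' 0, List.foldl_map, PySem.List.len_eq, hlen]
  -- induction over the processed range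
  suffices H : ∀ m : Int, 0 ≤ m → m ≤ (a.length : Int) →
      (PySem.List.pyRange 0 m 1).foldl
        (fun acc j => acc ++ [if PySem.Int.mod j blk == 0 then PySem.List.pyGetD b' j 0
          else min (acc.getLastD 0) (PySem.List.pyGetD b' j 0)]) []
      = (PySem.List.pyRange 0 m 1).map
          (fun idx => pvMin (pvBv a) (pvBs blk (idx + 1)) (idx + 1)) by
    exact H (a.length : Int) (by omega) le_rfl
  intro m hm
  induction m, hm using Int.le_induction with
  | base => intro _; rw [PySem.List.pyRange_one_eq_nil le_rfl]; rfl
  | succ n hn ih =>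
      intro hnN
      rw [PySem.List.pyRange_one_succ_right hn, List.foldl_append, List.map_append,
        ih (by omega)]
      simp only [List.foldl_cons, List.foldl_nil, List.map_cons, List.map_nil]
      congr 1
      rw [hb n hn (by omega), PySem.Int.mod_eq_emod_of_pos hblk]
      by_cases hc : n % blk = 0
      · rw [if_pos (by simpa using hc)]
        have hbs : pvBs blk (n + 1) = n + 1 := by
          rw [pvBs, show n + 1 - 1 = n by ring, PySem.Int.mod_eq_emod_of_pos hblk, hc]
          ring
        rw [hbs, pvMin_same]
      · rw [if_neg (by simpa using hc)]
        have hn1 : 1 ≤ n := by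
          rcases eq_or_lt_of_le hn with h0 | h0
          · exfalso; apply hc; rw [← h0]; rfl
          · omega
        -- last written entry is the running block minimum at n - 1
        rw [show n = (n - 1) + 1 by ring, PySem.List.pyRange_one_succ_right (by omega),
          List.map_append]
        simp only [List.map_cons, List.map_nil]
        rw [List.getLastD_concat]
        have hr := pvEmod_succ n blk hblk hc
        have hbs : pvBs blk (n + 1) = pvBs blk n := by
          rw [pvBs, pvBs, PySem.Int.mod_eq_emod_of_pos hblk, PySem.Int.mod_eq_emod_of_pos hblk,
            show n + 1 - 1 = n by ring, hr]
          ring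
        have hle : pvBs blk n ≤ n := by
          have := Int.emod_nonneg (n - 1) (ne_of_gt hblk)
          rw [pvBs, PySem.Int.mod_eq_emod_of_pos hblk]
          omega
        rw [show n - 1 + 1 = n by ring, hbs, pvMin_concat (pvBv a) (pvBs blk n) n hle]


-- B's bsuf: minimum from a position to the end of its block (clipped at N)
def pvGs (a : List Int) (blk idx : Int) : Int :=
  pvMin (pvBv a) (idx + 1) (min (pvBs blk (idx + 1) + blk - 1) (a.length : Int))

def pvRs (a : List Int) (blk m : Int) : Int :=
  if m = (a.length : Int) then 10 ^ 30 else pvGs a blk m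

theorem pvLBsuf_aux (a b' : List Int) (blk : Int) (hblk : 0 < blk)
    (hb : ∀ k : Int, 0 ≤ k → k < (a.length : Int) → PySem.List.pyGetD b' k 0 = pvBv a (k + 1)) :
    ∀ m : Int, 0 ≤ m → m ≤ (a.length : Int) →
    (PySem.List.pyRange (m - 1) (-1) (-1)).foldl
      (fun (st : List Int × Int) idx =>
        ((if PySem.Int.mod idx blk == blk - 1 || idx == (a.length : Int) - 1
          then PySem.List.pyGetD b' idx 0
          else min st.2 (PySem.List.pyGetD b' idx 0)) :: st.1,
         (if PySem.Int.mod idx blk == blk - 1 || idx == (a.length : Int) - 1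
          then PySem.List.pyGetD b' idx 0
          else min st.2 (PySem.List.pyGetD b' idx 0))))
      ((PySem.List.pyRange m (a.length : Int) 1).map (pvGs a blk), pvRs a blk m)
    = ((PySem.List.pyRange 0 (a.length : Int) 1).map (pvGs a blk), pvRs a blk 0) := by
  intro m hm
  induction m, hm using Int.le_induction with
  | base =>
      intro _
      rw [show (0:Int) - 1 = -1 by ring, PySem.List.pyRange_neg_one_eq_nil le_rfl]
      rfl
  | succ n hn ih =>
      intro hnN
      rw [show (n + 1 : Int) - 1 = n by ring,
        PySem.List.pyRange_neg_one_cons (by omega : (-1:Int) < n), List.foldl_cons]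
      have hread : PySem.List.pyGetD b' n 0 = pvBv a (n + 1) := hb n hn (by omega)
      have hrn : 0 ≤ PySem.Int.mod n blk ∧ PySem.Int.mod n blk < blk := by
        rw [PySem.Int.mod_eq_emod_of_pos hblk]
        exact ⟨Int.emod_nonneg _ (ne_of_gt hblk), Int.emod_lt_of_pos _ hblk⟩
      have hbs0 : pvBs blk (n + 1) = n + 1 - PySem.Int.mod n blk := by
        rw [pvBs, show n + 1 - 1 = n by ring]
      have hrun : (if PySem.Int.mod n blk == blk - 1 || n == (a.length : Int) - 1
          then PySem.List.pyGetD b' n 0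
          else min (pvRs a blk (n + 1)) (PySem.List.pyGetD b' n 0)) = pvGs a blk n := by
        by_cases hcond : PySem.Int.mod n blk = blk - 1 ∨ n = (a.length : Int) - 1
        · rw [if_pos (by rcases hcond with h | h <;> simp [h]), hread]
          have hmin : min (pvBs blk (n + 1) + blk - 1) (a.length : Int) = n + 1 := by
            rcases hcond with h | h
            · rw [hbs0, h]; omega
            · rw [hbs0]; omega
          rw [pvGs, hmin, pvMin_same]
        · rw [not_or] at hcond
          obtain ⟨h1, h2⟩ := hcond
          rw [if_neg (by simp [h1, h2]), hread]
          have hlt2 : n + 1 < (a.length : Int) := by omega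
          have hRs : pvRs a blk (n + 1) = pvGs a blk (n + 1) := by
            rw [pvRs, if_neg (by omega)]
          have hbs : pvBs blk (n + 2) = pvBs blk (n + 1) := by
            have hs := pvEmod_succ' n blk hblk (by
              rw [PySem.Int.mod_eq_emod_of_pos hblk] at h1; exact h1)
            rw [pvBs, pvBs, PySem.Int.mod_eq_emod_of_pos hblk, PySem.Int.mod_eq_emod_of_pos hblk,
              show n + 2 - 1 = n + 1 by ring, show n + 1 - 1 = n by ring, hs]
            ring
        -- run = min (pvGs (n+1)) (bv (n+1)) = pvGs n by peeling position n+1 off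
          have hmodlt : PySem.Int.mod n blk ≤ blk - 2 := by
            rw [PySem.Int.mod_eq_emod_of_pos hblk] at h1 ⊢
            have := Int.emod_lt_of_pos n hblk
            omega
          have hHge : n + 1 < min (pvBs blk (n + 1) + blk - 1) (a.length : Int) := by
            rw [hbs0]
            omega
          rw [hRs, pvGs, pvGs, show n + 1 + 1 = n + 2 by ring, hbs,
            pvMin_peel (pvBv a) (n + 1) _ hHge, min_comm, show n + 1 + 1 = n + 2 by ring]
      rw [hrun]
      have hlist : pvGs a blk n :: (PySem.List.pyRange (n + 1) (a.length : Int) 1).map (pvGs a blk)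
          = (PySem.List.pyRange n (a.length : Int) 1).map (pvGs a blk) := by
        rw [PySem.List.pyRange_one_cons (by omega : n < (a.length : Int)), List.map_cons]
      have hrs : pvGs a blk n = pvRs a blk n := by
        rw [pvRs, if_neg (by omega)]
      rw [hlist, hrs, ih (by omega)]

theorem pvLBsuf (a b' : List Int) (blk : Int) (hblk : 0 < blk)
    (hb : ∀ k : Int, 0 ≤ k → k < (a.length : Int) → PySem.List.pyGetD b' k 0 = pvBv a (k + 1)) :
    ((PySem.List.pyRange ((a.length : Int) - 1) (-1) (-1)).foldl
      (fun (st : List Int × Int) idx =>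
        ((if PySem.Int.mod idx blk == blk - 1 || idx == (a.length : Int) - 1
          then PySem.List.pyGetD b' idx 0
          else min st.2 (PySem.List.pyGetD b' idx 0)) :: st.1,
         (if PySem.Int.mod idx blk == blk - 1 || idx == (a.length : Int) - 1
          then PySem.List.pyGetD b' idx 0
          else min st.2 (PySem.List.pyGetD b' idx 0))))
      ([], 10 ^ 30)).1
    = (PySem.List.pyRange 0 (a.length : Int) 1).map (pvGs a blk) := by
  have h := pvLBsuf_aux a b' blk hblk hb (a.length : Int) (by omega) le_rfl
  rw [PySem.List.pyRange_one_eq_nil le_rfl, List.map_nil] at h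
  rw [show pvRs a blk (a.length : Int) = 10 ^ 30 from if_pos rfl] at h
  exact congrArg Prod.fst h

-- combining block prefix/suffix minima reproduces the window minimum
theorem pvCombine (a : List Int) (K i blk j0 : Int) (hK : 0 ≤ K)
    (hblk : blk = if 1 ≤ K then K else 1)
    (hj0 : j0 = min (max 1 (i - K + 1)) i)
    (h1 : 1 ≤ i) (h2 : i ≤ (a.length : Int)) :
    (if PySem.Int.floordiv (j0 - 1) blk == PySem.Int.floordiv (i - 1) blk
     then pvMin (pvBv a) (pvBs blk i) i
     else min (pvGs a blk (j0 - 1)) (pvMin (pvBv a) (pvBs blk i) i))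
    = pvMin (pvBv a) j0 i := by
  have hbp : 0 < blk := by
    rw [hblk]; split_ifs with h <;> omega
  have hj0le : j0 ≤ i := by omega
  have hj0ge : 1 ≤ j0 := by omega
  have hwin : i - j0 ≤ blk - 1 := by
    rw [hblk]; split_ifs with h <;> omega
  have hcase : (1 ≤ K ∧ blk = K ∧ (j0 = 1 ∨ j0 = i - K + 1)) ∨ (K = 0 ∧ blk = 1 ∧ j0 = i) := by
    by_cases h : 1 ≤ K
    · left; refine ⟨h, by rw [hblk, if_pos h], by omega⟩
    · right; refine ⟨by omega, by rw [hblk, if_neg h], by omega⟩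
  have hdef1 : blk * ((j0 - 1) / blk) + (j0 - 1) % blk = j0 - 1 := Int.ediv_add_emod _ _
  have hdef2 : blk * ((i - 1) / blk) + (i - 1) % blk = i - 1 := Int.ediv_add_emod _ _
  have hqle0 : (j0 - 1) / blk ≤ (i - 1) / blk := Int.ediv_le_ediv hbp (by omega)
  have hq1n0 : 0 ≤ (j0 - 1) / blk := Int.ediv_nonneg (by omega) (by omega)
  have hbr1 : 0 ≤ (j0 - 1) % blk := Int.emod_nonneg _ (ne_of_gt hbp)
  have hbr2 : (j0 - 1) % blk < blk := Int.emod_lt_of_pos _ hbp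
  have hbr3 : 0 ≤ (i - 1) % blk := Int.emod_nonneg _ (ne_of_gt hbp)
  have hbr4 : (i - 1) % blk < blk := Int.emod_lt_of_pos _ hbp
  have hbsi : pvBs blk i = i - (i - 1) % blk := by
    rw [pvBs, PySem.Int.mod_eq_emod_of_pos hbp]
  have hbsj : pvBs blk j0 = j0 - (j0 - 1) % blk := by
    rw [pvBs, PySem.Int.mod_eq_emod_of_pos hbp]
  obtain ⟨q1, hq1⟩ : ∃ q, (j0 - 1) / blk = q := ⟨_, rfl⟩
  obtain ⟨q2, hq2⟩ : ∃ q, (i - 1) / blk = q := ⟨_, rfl⟩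
  obtain ⟨r1, hr1⟩ : ∃ r, (j0 - 1) % blk = r := ⟨_, rfl⟩
  obtain ⟨r2, hr2⟩ : ∃ r, (i - 1) % blk = r := ⟨_, rfl⟩
  rw [hq1, hr1] at hdef1
  rw [hq2, hr2] at hdef2
  rw [hq1, hq2] at hqle0
  rw [hq1] at hq1n0
  rw [hr1] at hbr1 hbr2
  rw [hr2] at hbr3 hbr4
  rw [hr2] at hbsi
  rw [hr1] at hbsj
  obtain ⟨t1, ht1⟩ : ∃ t, blk * q1 = t := ⟨_, rfl⟩
  obtain ⟨t2, ht2⟩ : ∃ t, blk * q2 = t := ⟨_, rfl⟩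
  rw [ht1] at hdef1
  rw [ht2] at hdef2
  have ht1nn : 0 ≤ t1 := by rw [← ht1]; exact mul_nonneg (by omega) hq1n0
  have hfd : (PySem.Int.floordiv (j0 - 1) blk == PySem.Int.floordiv (i - 1) blk)
      = (decide (q1 = q2)) := by
    rw [PySem.Int.floordiv_eq_ediv_of_pos hbp, PySem.Int.floordiv_eq_ediv_of_pos hbp, hq1, hq2]
    by_cases h : q1 = q2
    · simp [h]
    · simp [h]
  rw [hfd]
  by_cases hq : q1 = q2
  · rw [if_pos (by simp [hq])]
    have htt : t1 = t2 := by rw [← ht1, ← ht2, hq]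
    have hr10 : r1 = 0 := by
      rcases hcase with ⟨hK1, hbe, hj⟩ | ⟨hK0, hbe, hj⟩
      · rcases hj with hj | hj <;> omega
      · omega
    have hbsieq : pvBs blk i = j0 := by omega
    rw [hbsieq]
  · rw [if_neg (by simp [hq])]
    have hqeq : q2 = q1 + 1 := by
      rcases eq_or_lt_of_le hqle0 with h | h
      · exact absurd h hq
      · rcases eq_or_lt_of_le (by omega : q1 + 1 ≤ q2) with h' | h'
        · omega
        · exfalso
          have hmul : blk * 2 ≤ blk * (q2 - q1) :=
            mul_le_mul_of_nonneg_left (by omega) (by omega)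
          have hdiff : blk * (q2 - q1) = t2 - t1 := by rw [← ht1, ← ht2]; ring
          omega
    have ht2lin : t2 = t1 + blk := by
      rw [← ht2, hqeq, mul_add, mul_one, ht1]
    have hgs : pvGs a blk (j0 - 1) = pvMin (pvBv a) j0 (pvBs blk i - 1) := by
      rw [pvGs, show j0 - 1 + 1 = j0 by ring, hbsj]
      congr 1
      omega
    rw [hgs, show pvBs blk i = (pvBs blk i - 1) + 1 by ring,
      pvMin_split (pvBv a) j0 (pvBs blk i - 1) i (by omega) (by omega),
      show pvBs blk i - 1 + 1 - 1 = pvBs blk i - 1 by ring]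

-- A's deque: an index stays iff its b-value beats everything after it in the window
def pvPall (a : List Int) (i j : Int) : Bool :=
  (PySem.List.pyRange (j + 1) (i + 1) 1).all (fun l => decide (pvBv a j < pvBv a l))

theorem pvPall_self (a : List Int) (i : Int) : pvPall a i i = true := by
  rw [pvPall, PySem.List.pyRange_one_eq_nil le_rfl]
  rfl

theorem pvPall_succ (a : List Int) (i j : Int) (hj : j ≤ i) :
    pvPall a (i + 1) j = (pvPall a i j && decide (pvBv a j < pvBv a (i + 1))) := by
  rw [pvPall, pvPall, show i + 1 + 1 = (i + 1) + 1 by ring,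
    PySem.List.pyRange_one_succ_right (by omega : j + 1 ≤ i + 1), List.all_append]
  simp

theorem pvPall_iff (a : List Int) (i j : Int) :
    pvPall a i j = true ↔ ∀ l : Int, j < l → l ≤ i → pvBv a j < pvBv a l := by
  rw [pvPall, List.all_eq_true]
  constructor
  · intro h l h1 h2
    have := h l (by rw [PySem.List.mem_pyRange_one]; omega)
    simpa using this
  · intro h l hl
    rw [PySem.List.mem_pyRange_one] at hl
    simpa using h l (by omega) (by omega)

theorem pvDropWhile_false (q : Int → Bool) (l : List Int) (h : ∀ x ∈ l, q x = false) :
    l.dropWhile q = l := by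
  cases l with
  | nil => rfl
  | cons x t => rw [List.dropWhile_cons, h x List.mem_cons_self]; simp

-- dropping the head indices below the new window start trims the filtered range
theorem pvDropWhile_filter_pyRange (p : Int → Bool) (hi Lp : Int) :
    ∀ (n : Nat) (lo : Int), lo + n = Lp →
    ((PySem.List.pyRange lo hi 1).filter p).dropWhile (fun j => decide (j < Lp))
      = (PySem.List.pyRange Lp hi 1).filter p := by
  intro n
  induction n with
  | zero =>
      intro lo hlo
      have : lo = Lp := by omega
      subst this
      apply pvDropWhile_false
      intro x hx
      rw [List.mem_filter, PySem.List.mem_pyRange_one] at hx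
      simp
      omega
  | succ n ih =>
      intro lo hlo
      by_cases hlohi : hi ≤ lo
      · rw [PySem.List.pyRange_one_eq_nil hlohi, PySem.List.pyRange_one_eq_nil (by omega)]
        rfl
      · rw [PySem.List.pyRange_one_cons (by omega : lo < hi), List.filter_cons]
        by_cases hp : p lo
        · rw [if_pos hp, List.dropWhile_cons, if_pos (by simp; omega)]
          exact ih (lo + 1) (by push_cast; omega)
        · rw [if_neg hp]
          exact ih (lo + 1) (by push_cast; omega)

-- popping the tail keeps exactly the elements whose predicate is false (predicate
-- monotone along the list, so the popped elements form a suffix)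
theorem pvPopBack (q : Int → Bool) (l : List Int)
    (hmono : l.Pairwise (fun x y => q x = true → q y = true)) :
    (l.reverse.dropWhile q).reverse = l.filter (fun x => !q x) := by
  induction l using List.reverseRecOn with
  | nil => rfl
  | append_singleton l' x ih =>
      rw [List.pairwise_append] at hmono
      obtain ⟨hl', _, hcross⟩ := hmono
      have hrev : (l' ++ [x]).reverse = x :: l'.reverse := by
        rw [List.reverse_append]; rfl
      rw [hrev, List.dropWhile_cons]
      by_cases hq : q x
      · rw [if_pos hq, ih hl', List.filter_append]
        have : List.filter (fun y => !q y) [x] = [] := by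
          simp [hq]
        rw [this, List.append_nil]
      · rw [if_neg hq, List.reverse_cons, List.reverse_reverse, List.filter_append]
        have h1 : List.filter (fun y => !q y) l' = l' := by
          apply List.filter_eq_self.mpr
          intro y hy
          by_cases hqy : q y
          · exact absurd (hcross y hy x List.mem_cons_self hqy) hq
          · simp [hqy]
        have h2 : List.filter (fun y => !q y) [x] = [x] := by simp [hq]
        rw [h1, h2]


-- the head of the deque carries the window minimum
theorem pvHeadFilter (a : List Int) (i : Int) :
    ∀ (n : Nat) (lo : Int), lo + n = i → lo ≤ i →
    pvBv a (((PySem.List.pyRange lo (i + 1) 1).filter (pvPall a i)).headD 0)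
      = pvMin (pvBv a) lo i := by
  intro n
  induction n with
  | zero =>
      intro lo h0 _
      have : lo = i := by omega
      subst this
      rw [PySem.List.pyRange_one_cons (by omega : lo < lo + 1),
        PySem.List.pyRange_one_eq_nil le_rfl, List.filter_cons, if_pos (pvPall_self a lo)]
      rw [pvMin_same]
      rfl
  | succ n ih =>
      intro lo h0 _
      have hlt : lo < i := by omega
      rw [PySem.List.pyRange_one_cons (by omega : lo < i + 1), List.filter_cons]
      by_cases hp : pvPall a i lo
      · rw [if_pos hp]
        show pvBv a lo = _
        have hub := (pvPall_iff a i lo).mp hp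
        apply le_antisymm ?_ (pvMin_le (pvBv a) lo i lo le_rfl (by omega))
        obtain ⟨j, hj1, hj2, hj3⟩ := pvMin_attain (pvBv a) lo i (by omega)
        rcases eq_or_lt_of_le hj1 with h | h
        · rw [hj3, ← h]
        · rw [hj3]
          exact le_of_lt (hub j h hj2)
      · rw [if_neg hp]
        rw [ih (lo + 1) (by omega) (by omega)]
        rw [pvMin_peel (pvBv a) lo i hlt]
        symm
        apply min_eq_right
        rw [pvPall_iff] at hp
        push_neg at hp
        obtain ⟨l, hl1, hl2, hl3⟩ := hp
        exact le_trans (pvMin_le (pvBv a) (lo + 1) i l (by omega) hl2) hl3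


-- the per-i quantities both programs compute
def pvOutA1 (a : List Int) (K i : Int) : Int :=
  if 1 ≤ max 1 (i - K + 1) - 1 then
    min (10 ^ 30) (min (10 ^ 30) (pvMin (pvAv a) 1 (max 1 (i - K + 1) - 1)))
  else 10 ^ 30

def pvOutA (a : List Int) (K i : Int) : Int :=
  if i + 1 ≤ (a.length : Int) then
    min (pvOutA1 a K i) (min (10 ^ 30) (pvMin (pvAv a) (i + 1) (a.length : Int)))
  else pvOutA1 a K i

def pvCurr (a : List Int) (K i : Int) : Int :=
  min (pvOutA a K i) (pvMin (pvBv a) (min (max 1 (i - K + 1)) i) i + K - i)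

def pvAns (a : List Int) (K m : Int) : Int :=
  (PySem.List.pyRange 1 (m + 1) 1).foldl (fun ans i => max ans (pvCurr a K i)) (-10 ^ 30)

def pvDq (a : List Int) (K m : Int) : List Int :=
  if m ≤ 0 then []
  else (PySem.List.pyRange (min (max 1 (m - K + 1)) m) (m + 1) 1).filter (pvPall a m)

theorem pvHeadD_mem (l : List Int) (hne : l ≠ []) : l.headD 0 ∈ l := by
  cases l with
  | nil => exact absurd rfl hne
  | cons x t => exact List.mem_cons_self

theorem pvAns_succ (a : List Int) (K m : Int) (hm : 0 ≤ m) :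
    pvAns a K (m + 1) = max (pvAns a K m) (pvCurr a K (m + 1)) := by
  rw [pvAns, pvAns, PySem.List.pyRange_one_succ_right (by omega : (1:Int) ≤ m + 1),
    List.foldl_append, List.foldl_cons, List.foldl_nil]

-- one pass of A's loop sends the deque/answer pair from stage m to stage m + 1
theorem pvAinv (a : List Int) (K : Int) (hK : 0 ≤ K) (P S B : List Int)
    (hP : ∀ k : Int, 1 ≤ k → k ≤ (a.length : Int) →
      PySem.List.pyGetD P k 0 = min (10 ^ 30) (pvMin (pvAv a) 1 k))
    (hS : ∀ k : Int, 2 ≤ k → k ≤ (a.length : Int) →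
      PySem.List.pyGetD S k 0 = min (10 ^ 30) (pvMin (pvAv a) k (a.length : Int)))
    (hB : ∀ j : Int, 1 ≤ j → j ≤ (a.length : Int) → PySem.List.pyGetD B j 0 = pvBv a j) :
    ∀ m : Int, 0 ≤ m → m ≤ (a.length : Int) →
    List.foldl
      (fun (st : List Int × Int) i =>
        ((List.dropWhile (fun j => decide (PySem.List.pyGetD B i 0 ≤ PySem.List.pyGetD B j 0))
            (List.dropWhile (fun j => decide (j < max 1 (i - K + 1))) st.1).reverse).reverse ++
          [i],
         max st.2
           (min
             (if i + 1 ≤ (a.length : Int) then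
               min
                 (if 1 ≤ max 1 (i - K + 1) - 1 then
                   min (10 ^ 30) (PySem.List.pyGetD P (max 1 (i - K + 1) - 1) 0)
                 else 10 ^ 30)
                 (PySem.List.pyGetD S (i + 1) 0)
             else
               if 1 ≤ max 1 (i - K + 1) - 1 then
                 min (10 ^ 30) (PySem.List.pyGetD P (max 1 (i - K + 1) - 1) 0)
               else 10 ^ 30)
             (PySem.List.pyGetD B
               (((List.dropWhile
                   (fun j => decide (PySem.List.pyGetD B i 0 ≤ PySem.List.pyGetD B j 0))
                   (List.dropWhile (fun j => decide (j < max 1 (i - K + 1))) st.1).reverse).reverse ++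
                 [i]).headD 0) 0 + K - i))))
      ([], -10 ^ 30) (PySem.List.pyRange 1 (m + 1))
    = (pvDq a K m, pvAns a K m) := by
  intro m hm
  induction m, hm using Int.le_induction with
  | base =>
      intro _
      rw [show (0:Int) + 1 = 1 by ring, PySem.List.pyRange_one_eq_nil le_rfl, List.foldl_nil,
        pvDq, if_pos le_rfl, pvAns, show (0:Int) + 1 = 1 by ring,
        PySem.List.pyRange_one_eq_nil le_rfl, List.foldl_nil]
  | succ m hm ih =>
      intro hmN
      rw [PySem.List.pyRange_one_succ_right (by omega : (1:Int) ≤ m + 1), List.foldl_append,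
        ih (by omega), List.foldl_cons, List.foldl_nil,
        show ((pvDq a K m, pvAns a K m) : List Int × Int).1 = pvDq a K m from rfl,
        show ((pvDq a K m, pvAns a K m) : List Int × Int).2 = pvAns a K m from rfl]
      -- the new deque
      have hWle : 1 ≤ min (max 1 (m + 1 - K + 1)) (m + 1) := by omega
      have hdq3 :
          (List.dropWhile
              (fun j => decide (PySem.List.pyGetD B (m + 1) 0 ≤ PySem.List.pyGetD B j 0))
              (List.dropWhile (fun j => decide (j < max 1 (m + 1 - K + 1))) (pvDq a K m)).reverse).reverse
            ++ [m + 1]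
          = pvDq a K (m + 1) := by
        have hdrop :
            List.dropWhile (fun j => decide (j < max 1 (m + 1 - K + 1))) (pvDq a K m)
            = (PySem.List.pyRange (max 1 (m + 1 - K + 1)) (m + 1)).filter (pvPall a m) := by
          rcases eq_or_lt_of_le hm with h0 | h0
          · rw [pvDq, if_pos (by omega)]
            rw [show List.dropWhile (fun j => decide (j < max 1 (m + 1 - K + 1))) [] = [] from rfl]
            symm
            rw [show (PySem.List.pyRange (max 1 (m + 1 - K + 1)) (m + 1)).filter (pvPall a m)
                = [] from by
              rw [PySem.List.pyRange_one_eq_nil (by omega)]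
              rfl]
          · rw [pvDq, if_neg (by omega)]
            exact pvDropWhile_filter_pyRange (pvPall a m) (m + 1) (max 1 (m + 1 - K + 1))
              ((max 1 (m + 1 - K + 1) - min (max 1 (m - K + 1)) m).toNat)
              (min (max 1 (m - K + 1)) m) (by omega)
        rw [hdrop]
        have hpop :
            (List.dropWhile
              (fun j => decide (PySem.List.pyGetD B (m + 1) 0 ≤ PySem.List.pyGetD B j 0))
              ((PySem.List.pyRange (max 1 (m + 1 - K + 1)) (m + 1)).filter (pvPall a m)).reverse).reverse
            = ((PySem.List.pyRange (max 1 (m + 1 - K + 1)) (m + 1)).filter (pvPall a m)).filter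
                (fun x => !(decide (PySem.List.pyGetD B (m + 1) 0 ≤ PySem.List.pyGetD B x 0))) := by
          apply pvPopBack
          apply List.Pairwise.imp_of_mem ?_
            ((PySem.List.pairwise_lt_pyRange_one _ _).filter (pvPall a m))
          intro x y hx hy hxy hqx
          rw [List.mem_filter, PySem.List.mem_pyRange_one] at hx hy
          have hbx : PySem.List.pyGetD B x 0 = pvBv a x := hB x (by omega) (by omega)
          have hby : PySem.List.pyGetD B y 0 = pvBv a y := hB y (by omega) (by omega)
          have hxlty : pvBv a x < pvBv a y :=
            (pvPall_iff a m x).mp hx.2 y (by omega) (by omega)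
          rw [hby]
          rw [hbx] at hqx
          simp only [decide_eq_true_eq] at *
          omega
        rw [hpop]
        -- merge the two filters into pvPall at stage m + 1, then append the new index
        have hmerge :
            ((PySem.List.pyRange (max 1 (m + 1 - K + 1)) (m + 1)).filter (pvPall a m)).filter
                (fun x => !(decide (PySem.List.pyGetD B (m + 1) 0 ≤ PySem.List.pyGetD B x 0)))
            = (PySem.List.pyRange (max 1 (m + 1 - K + 1)) (m + 1)).filter (pvPall a (m + 1)) := by
          rw [List.filter_filter]
          apply List.filter_congr
          intro x hx
          rw [PySem.List.mem_pyRange_one] at hx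
          rw [hB x (by omega) (by omega), hB (m + 1) (by omega) (by omega),
            pvPall_succ a m x (by omega)]
          by_cases hlt : pvBv a x < pvBv a (m + 1)
          · rw [decide_eq_true hlt, decide_eq_false (by omega : ¬ pvBv a (m + 1) ≤ pvBv a x)]
            simp
          · rw [decide_eq_false hlt, decide_eq_true (by omega : pvBv a (m + 1) ≤ pvBv a x)]
            simp
        rw [hmerge, pvDq, if_neg (by omega)]
        have hsplit : PySem.List.pyRange (min (max 1 (m + 1 - K + 1)) (m + 1)) (m + 1 + 1)
            = PySem.List.pyRange (min (max 1 (m + 1 - K + 1)) (m + 1)) (m + 1) ++ [m + 1] :=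
          PySem.List.pyRange_one_succ_right (by omega)
        rw [hsplit, List.filter_append]
        have hlast : List.filter (pvPall a (m + 1)) [m + 1] = [m + 1] := by
          rw [List.filter_cons, if_pos (pvPall_self a (m + 1))]
          rfl
        rw [hlast]
        congr 1
        by_cases hL : max 1 (m + 1 - K + 1) ≤ m + 1
        · rw [min_eq_left hL]
        · rw [PySem.List.pyRange_one_eq_nil (by omega),
            PySem.List.pyRange_one_eq_nil (by omega)]
      rw [hdq3]
      -- the new answer
      have hne : pvDq a K (m + 1) ≠ [] := by
        rw [pvDq, if_neg (by omega)]
        intro hnil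
        have : (m + 1 : Int) ∈ (PySem.List.pyRange (min (max 1 (m + 1 - K + 1)) (m + 1))
            (m + 1 + 1)).filter (pvPall a (m + 1)) := by
          rw [List.mem_filter, PySem.List.mem_pyRange_one]
          exact ⟨⟨by omega, by omega⟩, pvPall_self a (m + 1)⟩
        rw [hnil] at this
        exact absurd this (List.not_mem_nil)
      have hheadmem : (pvDq a K (m + 1)).headD 0 ∈ pvDq a K (m + 1) := pvHeadD_mem _ hne
      have hheadrange : 1 ≤ (pvDq a K (m + 1)).headD 0 ∧
          (pvDq a K (m + 1)).headD 0 ≤ m + 1 := by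
        have := hheadmem
        rw [pvDq, if_neg (by omega)] at this ⊢
        rw [List.mem_filter, PySem.List.mem_pyRange_one] at this
        omega
      have hminb : PySem.List.pyGetD B ((pvDq a K (m + 1)).headD 0) 0
          = pvMin (pvBv a) (min (max 1 (m + 1 - K + 1)) (m + 1)) (m + 1) := by
        rw [hB _ hheadrange.1 (by omega)]
        have hhf := pvHeadFilter a (m + 1)
          ((m + 1 - min (max 1 (m + 1 - K + 1)) (m + 1)).toNat)
          (min (max 1 (m + 1 - K + 1)) (m + 1)) (by omega) (by omega)
        rw [← hhf]
        congr 2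
        rw [pvDq, if_neg (by omega)]
      rw [hminb]
      have hout :
          (if m + 1 + 1 ≤ (a.length : Int) then
            min
              (if 1 ≤ max 1 (m + 1 - K + 1) - 1 then
                min (10 ^ 30) (PySem.List.pyGetD P (max 1 (m + 1 - K + 1) - 1) 0)
              else 10 ^ 30)
              (PySem.List.pyGetD S (m + 1 + 1) 0)
          else
            if 1 ≤ max 1 (m + 1 - K + 1) - 1 then
              min (10 ^ 30) (PySem.List.pyGetD P (max 1 (m + 1 - K + 1) - 1) 0)
            else 10 ^ 30)
          = pvOutA a K (m + 1) := by
        rw [pvOutA, pvOutA1]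
        split_ifs with h2 h1 h1
        · rw [hP _ (by omega) (by omega), hS _ (by omega) (by omega)]
        · rw [hS _ (by omega) (by omega)]
        · rw [hP _ (by omega) (by omega)]
        · rfl
      rw [hout, pvAns_succ a K m hm, pvCurr]
  


theorem pvA_eq (a : List Int) (K : Int) (hK : 0 ≤ K) :
    max_min_height a K = pvAns a K (a.length : Int) := by
  simp only [max_min_height]
  rw [pvLA1 a (a.length : Int) (by omega), pvLA2 a, pvLA3 a (a.length : Int)]
  rw [pvAinv a K hK
    ((10:Int) ^ 30 :: (PySem.List.pyRange 1 ((a.length : Int) + 1) 1).map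
      (fun k => min (10 ^ 30) (pvMin (pvAv a) 1 k)))
    ((10:Int) ^ 30 :: ((PySem.List.pyRange 1 ((a.length : Int) + 1) 1).map
      (fun k => min (10 ^ 30) (pvMin (pvAv a) k (a.length : Int))) ++ [10 ^ 30]))
    ((0:Int) :: (PySem.List.pyRange 1 ((a.length : Int) + 1) 1).map (pvBv a))
    (fun k hk1 hk2 => pvRead_cons_map _ _ _ _ _ hk1 hk2)
    (fun k hk1 hk2 => pvRead_cons_map_append _ _ _ _ _ _ (by omega) hk2)
    (fun j hj1 hj2 => pvRead_cons_map _ _ _ _ _ hj1 hj2)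
    (a.length : Int) (by omega) le_rfl]


theorem pvAvBound (a : List Int) (hall : a.all (fun y => pvDomInt y) = true)
    (j : Int) (h1 : 1 ≤ j) (h2 : j ≤ (a.length : Int)) : pvAv a j ≤ 2147483648 := by
  rw [pvAv_getD a j h1]
  have hidx : (j - 1).toNat < a.length := by omega
  have hmem : a.getD (j - 1).toNat 0 ∈ a := by
    rw [List.getD_eq_getElem a _ hidx]
    exact List.getElem_mem _
  have hd := (List.all_eq_true.mp hall) _ hmem
  simp only [pvDomInt, decide_eq_true_eq] at hd
  omega

theorem pvMinBound (a : List Int) (hall : a.all (fun y => pvDomInt y) = true)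
    (lo hi : Int) (h1 : 1 ≤ lo) (h2 : lo ≤ hi) (h3 : hi ≤ (a.length : Int)) :
    min ((10:Int) ^ 30) (pvMin (pvAv a) lo hi) = pvMin (pvAv a) lo hi := by
  apply min_eq_right
  obtain ⟨j, hj1, hj2, hj3⟩ := pvMin_attain (pvAv a) lo hi h2
  rw [hj3]
  have := pvAvBound a hall j (by omega) (by omega)
  omega

theorem pvA_nil (K : Int) : max_min_height [] K = -10 ^ 30 := by
  simp only [max_min_height, List.length_nil, Nat.cast_zero]
  rw [show (0:Int) + 1 = 1 by ring, PySem.List.pyRange_one_eq_nil le_rfl]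
  rfl

theorem pvB_nil (K : Int) : max_min_height_alt [] K = -10 ^ 30 := by
  simp [max_min_height_alt]

set_option maxHeartbeats 1000000 in
theorem pvB_eq (a : List Int) (K : Int) (hall : a.all (fun y => pvDomInt y) = true)
    (hK : 0 ≤ K) : max_min_height_alt a K = pvAns a K (a.length : Int) := by
  by_cases ha : a = []
  · subst ha
    rw [pvB_nil K, pvAns,
      show ((([] : List Int).length : Int) + 1) = 1 by simp,
      PySem.List.pyRange_one_eq_nil le_rfl, List.foldl_nil]
  · simp only [max_min_height_alt]
    rw [if_neg (by simp [ha])]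
    generalize hbl : List.map (fun p => p.2 + p.1) (PySem.List.enumerate a 1) = bl
    generalize hblk : (if 1 ≤ K then K else 1 : Int) = blk
    have hblkpos : (0:Int) < blk := by rw [← hblk]; split_ifs with h <;> omega
    have hlenb : bl.length = a.length := by
      rw [← hbl, List.length_map, PySem.List.length_enumerate]
    have hreads : ∀ k : Int, 0 ≤ k → k < (a.length : Int) →
        PySem.List.pyGetD bl k 0 = pvBv a (k + 1) := by
      intro k h1 h2
      rw [← hbl]
      exact pvLBb a k h1 h2
    have hpre := pvLBpre a bl blk hblkpos hlenb hreads
    have hsuf := pvLBsuf a bl blk hblkpos hreads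
    rw [hpre, hsuf]
    show List.foldl _ (-10 ^ 30) _ = _
    rw [pvAns]
    apply PySem.List.foldl_congr_mem
    intro acc i hi
    rw [PySem.List.mem_pyRange_one] at hi
    have hi1 : 1 ≤ i := by omega
    have hiN : i ≤ (a.length : Int) := by omega
    congr 1
    -- window minimum via the block decomposition
    have hbpre : PySem.List.pyGetD
        ((PySem.List.pyRange 0 (a.length : Int) 1).map
          (fun idx => pvMin (pvBv a) (pvBs blk (idx + 1)) (idx + 1)))
        (i - 1) 0 = pvMin (pvBv a) (pvBs blk i) i := by
      rw [PySem.List.pyGetD_map_pyRange_of_nonneg _ _ _ _ (by omega) (by omega)]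
      rw [show i - 1 + 1 = i by ring]
    have hbsuf : PySem.List.pyGetD
        ((PySem.List.pyRange 0 (a.length : Int) 1).map (pvGs a blk))
        (min (max 1 (i - K + 1)) i - 1) 0
        = pvGs a blk (min (max 1 (i - K + 1)) i - 1) := by
      rw [PySem.List.pyGetD_map_pyRange_of_nonneg _ _ _ _ (by omega) (by omega)]
    rw [hbpre, hbsuf,
      pvCombine a K i blk (min (max 1 (i - K + 1)) i) hK hblk.symm rfl hi1 hiN]
    rw [pvCurr]
    congr 1
    -- the outside minimum agrees with A's INF-seeded form on the domain
    rw [pvOutA, pvOutA1]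
    by_cases h2 : i + 1 ≤ (a.length : Int)
    · rw [if_pos (by omega : i < (a.length : Int)), if_pos h2,
        pvLB2 a i ha (by omega) (by omega)]
      by_cases h1 : 2 ≤ max 1 (i - K + 1)
      · rw [if_pos h1, if_pos (by omega : 1 ≤ max 1 (i - K + 1) - 1),
          show max 1 (i - K + 1) - 2 = (max 1 (i - K + 1) - 1) - 1 by ring,
          pvLB1 a (max 1 (i - K + 1) - 1) (by omega) (by omega),
          pvMinBound a hall 1 (max 1 (i - K + 1) - 1) le_rfl (by omega) (by omega),
          pvMinBound a hall 1 (max 1 (i - K + 1) - 1) le_rfl (by omega) (by omega),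
          pvMinBound a hall (i + 1) (a.length : Int) (by omega) (by omega) (by omega)]
      · rw [if_neg h1, if_neg (by omega : ¬ 1 ≤ max 1 (i - K + 1) - 1),
          pvMinBound a hall (i + 1) (a.length : Int) (by omega) (by omega) (by omega),
          pvMinBound a hall (i + 1) (a.length : Int) (by omega) (by omega) (by omega)]
    · rw [if_neg (by omega : ¬ i < (a.length : Int)), if_neg h2]
      by_cases h1 : 2 ≤ max 1 (i - K + 1)
      · rw [if_pos h1, if_pos (by omega : 1 ≤ max 1 (i - K + 1) - 1),
          show max 1 (i - K + 1) - 2 = (max 1 (i - K + 1) - 1) - 1 by ring,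
          pvLB1 a (max 1 (i - K + 1) - 1) (by omega) (by omega),
          pvMinBound a hall 1 (max 1 (i - K + 1) - 1) le_rfl (by omega) (by omega),
          pvMinBound a hall 1 (max 1 (i - K + 1) - 1) le_rfl (by omega) (by omega)]
      · rw [if_neg h1, if_neg (by omega : ¬ 1 ≤ max 1 (i - K + 1) - 1)]


-- ===== VERDICT (by name: the statement is the Claim_ definition above) =====
theorem max_min_height_spec : Claim_equal_max_min_height := by
  intro a K hDom hPre
  unfold Spec_max_min_height
  rcases hPre with ha | hK
  · subst ha
    rw [pvA_nil, pvB_nil]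
  · have hall : a.all (fun y => pvDomInt y) = true := by
      unfold Dom_max_min_height at hDom
      simp only [Bool.and_eq_true] at hDom
      exact hDom.1
    rw [pvA_eq a K hK, pvB_eq a K hall hK]
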